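-- pv_equiv track=rewrite | github.com/Kawser-nerd/CLCDSA | Source Codes/AtCoder/abc116/C/4936110.py | count
-- ===== SOURCE A (Python) =====
-- def count(hh, n):
--     c = 0
--     b = False
--     for h in hh:
--         if h >= n:
--             if b == False:
--                 b = True
--                 c += 1
--         else:
--             if b == True:
--                 b = False
--     return c
-- ===== SOURCE B (Python) =====
-- from itertools import groupby
--
-- def count(hh, n):
--     return sum(1 for key, _g in groupby(hh, key=lambda x: x >= n) if key)
-- ===== Notes on version B (the rewrite author's own statement) =====
-- stated objective: idiomatic
-- what changed: Replaced the explicit boolean run-flag state machine with itertools.groupby, which partitions the sequence into consecutive runs by the predicate h >= n and counts the True-keyed runs.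
import Mathlib
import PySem

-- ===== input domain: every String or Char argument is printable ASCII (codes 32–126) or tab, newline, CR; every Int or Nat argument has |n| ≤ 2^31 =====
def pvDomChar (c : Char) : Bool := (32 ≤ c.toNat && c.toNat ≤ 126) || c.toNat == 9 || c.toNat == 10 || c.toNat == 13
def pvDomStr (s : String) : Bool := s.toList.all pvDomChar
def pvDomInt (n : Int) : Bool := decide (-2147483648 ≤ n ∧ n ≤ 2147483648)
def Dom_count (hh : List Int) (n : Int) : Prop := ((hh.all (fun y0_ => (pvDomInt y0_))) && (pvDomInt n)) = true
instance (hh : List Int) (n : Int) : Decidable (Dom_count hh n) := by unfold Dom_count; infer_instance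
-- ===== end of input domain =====

-- B replaces A's explicit boolean run-flag state machine by grouping the list into
-- consecutive runs of the predicate (itertools.groupby) and counting the True runs.

-- ===== PORT A =====
-- A's loop: state (c, b), branch order as in the Python.
def count (hh : List Int) (n : Int) : Int :=
  (hh.foldl
    (fun (s : Int × Bool) h =>
      if h ≥ n then
        (if s.2 = false then (s.1 + 1, true) else s)
      else
        (if s.2 = true then (s.1, false) else s))
    (0, false)).1

-- ===== PORT B =====
-- groupby(hh, key = fun x => x ≥ n): the list of group keys (consecutive duplicates collapsed).
def groupbyKeys : List Bool → List Bool
  | [] => []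
  | [k] => [k]
  | k :: k' :: rest =>
      if k = k' then groupbyKeys (k' :: rest) else k :: groupbyKeys (k' :: rest)

-- sum(1 for key, _g in groupby(hh, key=lambda x: x >= n) if key)
def count_alt (hh : List Int) (n : Int) : Int :=
  ((groupbyKeys (hh.map (fun h => decide (h ≥ n)))).filter (fun k => k)).length

-- ===== PRECONDITION & SPEC =====
def Spec_count (hh : List Int) (n : Int) (out : Int) : Prop := out = count_alt hh n
instance (hh : List Int) (n : Int) (out : Int) : Decidable (Spec_count hh n out) := by unfold Spec_count; infer_instance

-- ===== CLAIM (what is proved, stated in full; the proofs are below) =====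
def Claim_equal_count : Prop := ∀ (hh : List Int) (n : Int), Dom_count hh n → Spec_count hh n (count hh n)

-- ===== LEMMAS AND PROOFS =====

-- number of new runs of `true` in a key list, entered with previous key `b`
def runs : Bool → List Bool → Int
  | _, [] => 0
  | b, k :: rest => (if k && !b then 1 else 0) + runs k rest

lemma foldl_runs (hh : List Int) (n : Int) (c : Int) (b : Bool) :
    (hh.foldl
      (fun (s : Int × Bool) h =>
        if h ≥ n then
          (if s.2 = false then (s.1 + 1, true) else s)
        else
          (if s.2 = true then (s.1, false) else s))
      (c, b)).1 = c + runs b (hh.map (fun h => decide (h ≥ n))) := by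
  induction hh generalizing c b with
  | nil => simp [runs]
  | cons h rest ih =>
    by_cases p : h ≥ n <;> cases b <;>
      simp [List.foldl, runs, ih, p] <;> ring

lemma groupbyKeys_runs (k : Bool) (rest : List Bool) :
    (((groupbyKeys (k :: rest)).filter (fun x => x)).length : Int)
      = (if k then 1 else 0) + runs k rest := by
  induction rest generalizing k with
  | nil => cases k <;> simp [groupbyKeys, runs]
  | cons k' rest ih =>
    by_cases h : k = k'
    · subst h
      simp only [groupbyKeys, if_pos trivial]
      rw [ih k]
      cases k <;> simp [runs]
    · simp only [groupbyKeys, if_neg h]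
      rw [List.filter_cons]
      cases k <;> cases k' <;> simp_all [runs] <;> ring

theorem count_spec : Claim_equal_count := by
  intro hh n _
  unfold Spec_count count_alt count
  rw [foldl_runs hh n 0 false, zero_add]
  cases hm : hh.map (fun h => decide (h ≥ n)) with
  | nil => simp [groupbyKeys, runs]
  | cons k rest =>
    rw [groupbyKeys_runs k rest]
    cases k <;> simp [runs]
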